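-- pv_equiv track=rewrite | github.com/nadezdacrimea-rgb/HSE_Yakushina_Nadezhda | задание4.py | is_valid_inn
-- ===== SOURCE A (Python) =====
-- def clean_inn_string(inn_str: str) -> str:
--     """Удаляет из строки все символы, кроме цифр (пробелы, дефисы и т.п.)."""
--     return ''.join(ch for ch in inn_str if ch.isdigit())
--
-- def compute_checksum(digits: list, weights: list) -> int:
--     """
--     Вычисляет контрольное число по алгоритму:
--     сумма произведений цифр на весовые коэффициенты, затем остаток от деления на 11,
--     если результат > 9, берётся остаток от деления на 10.
--     """
--     if len(digits) != len(weights):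
--         raise ValueError("Длина списка цифр не совпадает с длиной весовых коэффициентов")
--     total = sum(d * w for d, w in zip(digits, weights))
--     checksum = total % 11
--     if checksum > 9:
--         checksum %= 10
--     return checksum
--
-- def validate_inn_10(digits: list) -> bool:
--     """
--     Валидация 10-значного ИНН (организации).
--     digits: список из 10 целых цифр.
--     """
--     # Весовые коэффициенты для первых 9 цифр
--     weights = [2, 4, 10, 3, 5, 9, 4, 6, 8]
--     # Вычисляем контрольное число для первых 9 цифр
--     calculated = compute_checksum(digits[:9], weights)
--     # Сравниваем с 10-й цифрой
--     return calculated == digits[9]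
--
-- def validate_inn_12(digits: list) -> bool:
--     """
--     Валидация 12-значного ИНН (физического лица или ИП).
--     digits: список из 12 целых цифр.
--     """
--     # Первое контрольное число (для первых 10 цифр)
--     weights1 = [7, 2, 4, 10, 3, 5, 9, 4, 6, 8]
--     check1 = compute_checksum(digits[:10], weights1)
--     if check1 != digits[10]:
--         return False
--
--     # Второе контрольное число (для первых 11 цифр)
--     weights2 = [3, 7, 2, 4, 10, 3, 5, 9, 4, 6, 8]
--     check2 = compute_checksum(digits[:11], weights2)
--     return check2 == digits[11]
--
-- def is_valid_inn(inn_str: str) -> bool: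
--     """
--     Основная функция валидации ИНН.
--     Принимает строку (возможно с пробелами/дефисами) и возвращает True/False.
--     """
--     inn_clean = clean_inn_string(inn_str)
--
--     # Проверка: строка должна состоять только из цифр
--     if not inn_clean.isdigit():
--         return False
--
--     digits = [int(ch) for ch in inn_clean]
--     length = len(digits)
--
--     if length == 10:
--         return validate_inn_10(digits)
--     elif length == 12:
--         return validate_inn_12(digits)
--     else:
--         return False  # неверная длина
-- ===== SOURCE B (Python) =====
-- def is_valid_inn(inn_str: str) -> bool:
--     """Streaming INN validation: single pass over the raw string with scalar
--     accumulators -- no cleaned string, no digit list, no slicing, no zip."""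
--     WA = [2, 4, 10, 3, 5, 9, 4, 6, 8]
--     WB = [7, 2, 4, 10, 3, 5, 9, 4, 6, 8]
--     WC = [3, 7, 2, 4, 10, 3, 5, 9, 4, 6, 8]
--     k = 0
--     sA = sB = sC = 0
--     d9 = d10 = d11 = 0
--     for ch in inn_str:
--         if '0' <= ch <= '9':
--             d = ord(ch) - 48
--             if k < 9:
--                 sA += d * WA[k]
--             if k < 10:
--                 sB += d * WB[k]
--             if k < 11:
--                 sC += d * WC[k]
--             if k == 9:
--                 d9 = d
--             if k == 10:
--                 d10 = d
--             if k == 11: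
--                 d11 = d
--             k += 1
--     if k == 10:
--         return sA % 11 % 10 == d9
--     if k == 12:
--         return sB % 11 % 10 == d10 and sC % 11 % 10 == d11
--     return False
-- ===== Notes on version B (the rewrite author's own statement) =====
-- stated objective: alternative
-- what changed: Replaced A's staged pipeline (clean string, build digit list, slice prefixes, zip with weight lists, helper per length) by a single streaming pass over the raw string that keeps only scalar accumulators: three running weighted sums and the three potential control digits, decided at the end from the digit count.
import Mathlib
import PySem

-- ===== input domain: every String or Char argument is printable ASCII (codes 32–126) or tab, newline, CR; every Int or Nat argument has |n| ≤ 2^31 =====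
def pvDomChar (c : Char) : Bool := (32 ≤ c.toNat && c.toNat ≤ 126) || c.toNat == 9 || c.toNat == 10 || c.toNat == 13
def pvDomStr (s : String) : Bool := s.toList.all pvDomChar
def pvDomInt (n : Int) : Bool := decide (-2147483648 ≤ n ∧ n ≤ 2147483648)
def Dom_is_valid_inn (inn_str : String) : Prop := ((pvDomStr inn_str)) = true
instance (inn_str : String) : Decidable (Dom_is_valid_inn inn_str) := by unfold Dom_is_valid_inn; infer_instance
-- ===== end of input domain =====

-- B replaces A's staged pipeline (clean, digit list, slices, zip with weight lists)
-- by one streaming pass over the raw string with scalar accumulators (objective: alternative).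

-- ===== PORT A =====
-- int(ch) for a single digit char (exact on '0'..'9', the only chars clean_inn_string keeps)
def pvDigitVal (c : Char) : Int := (c.toNat : Int) - 48

def clean_inn_string (cs : List Char) : List Char :=
  cs.filter (fun c => PySem.Chars.isdigit c)

-- the Python raises ValueError on a length mismatch; unreachable from is_valid_inn
-- (every call slices the digits to the weights' length), so the port is total
def compute_checksum (digits weights : List Int) : Int :=
  let total := (digits.zip weights).foldl (fun acc p => acc + p.1 * p.2) 0
  let checksum := PySem.Int.mod total 11
  if checksum > 9 then PySem.Int.mod checksum 10 else checksum

def validate_inn_10 (digits : List Int) : Bool :=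
  let weights : List Int := [2, 4, 10, 3, 5, 9, 4, 6, 8]
  let calculated := compute_checksum (PySem.List.slice digits none (some 9)) weights
  -- digits[9]: in range at the call site (length 10), so the total pyGetD is exact
  decide (calculated = PySem.List.pyGetD digits 9 0)

def validate_inn_12 (digits : List Int) : Bool :=
  let weights1 : List Int := [7, 2, 4, 10, 3, 5, 9, 4, 6, 8]
  let check1 := compute_checksum (PySem.List.slice digits none (some 10)) weights1
  if check1 ≠ PySem.List.pyGetD digits 10 0 then false
  else
    let weights2 : List Int := [3, 7, 2, 4, 10, 3, 5, 9, 4, 6, 8]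
    let check2 := compute_checksum (PySem.List.slice digits none (some 11)) weights2
    decide (check2 = PySem.List.pyGetD digits 11 0)

def is_valid_inn (inn_str : String) : Bool :=
  let inn_clean := clean_inn_string inn_str.toList
  if !(PySem.Chars.strIsdigit inn_clean) then false
  else
    let digits := inn_clean.map pvDigitVal
    let length := PySem.List.len digits
    if length = 10 then validate_inn_10 digits
    else if length = 12 then validate_inn_12 digits
    else false

-- ===== PORT B =====
def pvW10 : List Int := [2, 4, 10, 3, 5, 9, 4, 6, 8]
def pvW11 : List Int := [7, 2, 4, 10, 3, 5, 9, 4, 6, 8]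
def pvW12 : List Int := [3, 7, 2, 4, 10, 3, 5, 9, 4, 6, 8]

-- the loop's scalar state: digit count, three running weighted sums, three control digits
structure PvSt where
  k : Nat       -- counts kept digits; only ever incremented from 0, so Nat is exact
  sA : Int
  sB : Int
  sC : Int
  d9 : Int
  d10 : Int
  d11 : Int
deriving DecidableEq, Repr

-- one iteration of Source B's for-loop ('0' <= ch <= '9' test, guarded accumulator updates)
def pvStep (st : PvSt) (c : Char) : PvSt :=
  if '0' ≤ c ∧ c ≤ '9' then
    let d : Int := (c.toNat : Int) - 48
    { k := st.k + 1
      sA := if st.k < 9 then st.sA + d * PySem.List.pyGetD pvW10 (st.k : Int) 0 else st.sA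
      sB := if st.k < 10 then st.sB + d * PySem.List.pyGetD pvW11 (st.k : Int) 0 else st.sB
      sC := if st.k < 11 then st.sC + d * PySem.List.pyGetD pvW12 (st.k : Int) 0 else st.sC
      d9 := if st.k = 9 then d else st.d9
      d10 := if st.k = 10 then d else st.d10
      d11 := if st.k = 11 then d else st.d11 }
  else st

def is_valid_inn_alt (inn_str : String) : Bool :=
  let st := inn_str.toList.foldl pvStep ⟨0, 0, 0, 0, 0, 0, 0⟩
  if st.k = 10 then
    decide (PySem.Int.mod (PySem.Int.mod st.sA 11) 10 = st.d9)
  else if st.k = 12 then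
    decide (PySem.Int.mod (PySem.Int.mod st.sB 11) 10 = st.d10)
      && decide (PySem.Int.mod (PySem.Int.mod st.sC 11) 10 = st.d11)
  else false

-- ===== PRECONDITION & SPEC =====
def Spec_is_valid_inn (inn_str : String) (out : Bool) : Prop := out = is_valid_inn_alt inn_str
instance (inn_str : String) (out : Bool) : Decidable (Spec_is_valid_inn inn_str out) := by unfold Spec_is_valid_inn; infer_instance

-- ===== CLAIM (what is proved, stated in full; the proofs are below) =====
def Claim_equal_is_valid_inn : Prop := ∀ (inn_str : String), Dom_is_valid_inn inn_str → Spec_is_valid_inn inn_str (is_valid_inn inn_str)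

-- ===== LEMMAS AND PROOFS =====

-- the weighted prefix sum A computes via zip, as a function of the whole digit list
def pvSumZip (ds ws : List Int) : Int := ((ds.zip ws).map (fun p => p.1 * p.2)).sum

-- the loop state after consuming exactly the digits ds
def pvStOf (ds : List Int) : PvSt :=
  ⟨ds.length, pvSumZip ds pvW10, pvSumZip ds pvW11, pvSumZip ds pvW12,
    ds.getD 9 0, ds.getD 10 0, ds.getD 11 0⟩

lemma pvIsdigitEq (c : Char) : PySem.Chars.isdigit c = decide ('0' ≤ c ∧ c ≤ '9') := by
  simp [PySem.Chars.isdigit]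

lemma pvSumZipApp (ds : List Int) (d : Int) (ws : List Int) :
    pvSumZip (ds ++ [d]) ws
      = if ds.length < ws.length then pvSumZip ds ws + d * ws.getD ds.length 0
        else pvSumZip ds ws := by
  induction ds generalizing ws with
  | nil => cases ws <;> simp [pvSumZip]
  | cons x ds ih =>
    cases ws with
    | nil => simp [pvSumZip]
    | cons w ws =>
      simp only [List.cons_append, pvSumZip, List.zip_cons_cons, List.map, List.sum_cons,
        List.length_cons, List.getD_cons_succ]
      rw [show ((((ds ++ [d]).zip ws).map (fun p : Int × Int => p.1 * p.2)).sum)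
            = pvSumZip (ds ++ [d]) ws from rfl, ih ws]
      simp only [pvSumZip]
      split_ifs with h h'
      · ring
      · exfalso; omega
      · exfalso; omega
      · ring

lemma pvGetDApp (ds : List Int) (d : Int) (n : Nat) :
    (ds ++ [d])[n]?.getD 0 = if ds.length = n then d else ds[n]?.getD 0 := by
  induction ds generalizing n with
  | nil => cases n <;> simp
  | cons x ds ih =>
    cases n with
    | zero => simp
    | succ n => simpa using ih n

lemma pvStepDigit (ds : List Int) (c : Char) (hc : PySem.Chars.isdigit c = true) :
    pvStep (pvStOf ds) c = pvStOf (ds ++ [pvDigitVal c]) := by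
  rw [pvIsdigitEq, decide_eq_true_eq] at hc
  simp only [pvStep, pvStOf, if_pos hc, pvDigitVal, PySem.List.pyGetD_natCast]
  simp [pvSumZipApp, pvGetDApp, pvW10, pvW11, pvW12, List.getD]

lemma pvFold (cs : List Char) (ds : List Int) :
    cs.foldl pvStep (pvStOf ds)
      = pvStOf (ds ++ (cs.filter (fun c => PySem.Chars.isdigit c)).map pvDigitVal) := by
  induction cs generalizing ds with
  | nil => simp
  | cons c cs ih =>
    by_cases hc : PySem.Chars.isdigit c = true
    · rw [List.foldl_cons, pvStepDigit ds c hc, ih (ds ++ [pvDigitVal c])]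
      simp [hc]
    · have hskip : pvStep (pvStOf ds) c = pvStOf ds := by
        rw [pvIsdigitEq] at hc
        simp only [pvStep]
        rw [if_neg (by simpa using hc)]
      rw [List.foldl_cons, hskip, ih ds]
      simp [hc]

-- (t % 11) capped by the 'if > 9' branch equals (t % 11) % 10 unconditionally
lemma pvModMod (t : Int) :
    (if PySem.Int.mod t 11 > 9 then PySem.Int.mod (PySem.Int.mod t 11) 10
     else PySem.Int.mod t 11)
      = PySem.Int.mod (PySem.Int.mod t 11) 10 := by
  have h0 := PySem.Int.mod_nonneg t (b := 11) (by omega)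
  have h1 := PySem.Int.mod_lt t (b := 11) (by omega)
  rw [PySem.Int.mod_eq_emod_of_pos (a := t) (b := 11) (by omega),
      PySem.Int.mod_eq_emod_of_pos (b := 10) (by omega)]
  omega

-- zipping a truncated list with weights no longer than the cut is zipping the list itself
lemma pvZipTake {α β : Type} (xs : List α) (ws : List β) (n : Nat) (h : ws.length ≤ n) :
    (xs.take n).zip ws = xs.zip ws := by
  induction xs generalizing ws n with
  | nil => simp
  | cons x xs ih =>
    cases ws with
    | nil => simp
    | cons w ws =>
      cases n with
      | zero => simp at h
      | succ n => simpa [List.zip] using ih ws n (by simpa using h)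

-- A's foldl sum of products equals the map-then-sum form pvSumZip
lemma pvSumEq (ps : List (Int × Int)) :
    ps.foldl (fun acc p => acc + p.1 * p.2) 0 = (ps.map (fun p => p.1 * p.2)).sum := by
  simpa using PySem.List.foldl_add ps (fun p => p.1 * p.2) 0

-- a filtered-to-digits string is .isdigit() iff it is nonempty
lemma pvIsdigitFilter (cs : List Char) :
    PySem.Chars.strIsdigit (cs.filter (fun c => PySem.Chars.isdigit c))
      = !(cs.filter (fun c => PySem.Chars.isdigit c)).isEmpty := by
  simp [PySem.Chars.strIsdigit, List.all_filter]

lemma pvCheck10 (ds : List Int) :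
    validate_inn_10 ds
      = decide (PySem.Int.mod (PySem.Int.mod (pvSumZip ds pvW10) 11) 10 = ds.getD 9 0) := by
  have hzip : (List.take ((9 : Int).toNat) ds).zip ([2, 4, 10, 3, 5, 9, 4, 6, 8] : List Int)
      = ds.zip pvW10 := pvZipTake ds _ _ (by simp)
  simp only [validate_inn_10, compute_checksum,
    PySem.List.slice_to (xs := ds) (b := 9) (by omega), hzip, pvSumEq, pvModMod,
    PySem.List.pyGetD_ofNat', pvSumZip]
  rfl

lemma pvCheck12 (ds : List Int) :
    validate_inn_12 ds
      = (decide (PySem.Int.mod (PySem.Int.mod (pvSumZip ds pvW11) 11) 10 = ds.getD 10 0)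
          && decide (PySem.Int.mod (PySem.Int.mod (pvSumZip ds pvW12) 11) 10 = ds.getD 11 0)) := by
  have hzip1 : (List.take ((10 : Int).toNat) ds).zip ([7, 2, 4, 10, 3, 5, 9, 4, 6, 8] : List Int)
      = ds.zip pvW11 := pvZipTake ds _ _ (by simp)
  have hzip2 : (List.take ((11 : Int).toNat) ds).zip ([3, 7, 2, 4, 10, 3, 5, 9, 4, 6, 8] : List Int)
      = ds.zip pvW12 := pvZipTake ds _ _ (by simp)
  simp only [validate_inn_12, compute_checksum,
    PySem.List.slice_to (xs := ds) (b := 10) (by omega),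
    PySem.List.slice_to (xs := ds) (b := 11) (by omega), hzip1, hzip2, pvSumEq, pvModMod,
    PySem.List.pyGetD_ofNat', pvSumZip]
  by_cases h : PySem.Int.mod (PySem.Int.mod ((List.map (fun p => p.1 * p.2) (ds.zip pvW11)).sum) 11) 10
      = ds.getD 10 0 <;> simp

-- ===== VERDICT (by name: the statement is the Claim_ definition above) =====
theorem is_valid_inn_spec : Claim_equal_is_valid_inn := by
  intro s _
  unfold Spec_is_valid_inn
  simp only [is_valid_inn, is_valid_inn_alt, clean_inn_string]
  rw [pvIsdigitFilter]
  have hfold : s.toList.foldl pvStep ⟨0, 0, 0, 0, 0, 0, 0⟩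
      = pvStOf ((s.toList.filter (fun c => PySem.Chars.isdigit c)).map pvDigitVal) := by
    simpa using pvFold s.toList []
  rw [hfold]
  set ds := (s.toList.filter (fun c => PySem.Chars.isdigit c)).map pvDigitVal with hds
  by_cases hempty : s.toList.filter (fun c => PySem.Chars.isdigit c) = []
  · simp [hempty, hds, pvStOf, pvSumZip]
  · have hne : (s.toList.filter (fun c => PySem.Chars.isdigit c)).isEmpty = false := by
      simpa [List.isEmpty_iff] using hempty
    simp only [hne, Bool.not_false, Bool.not_true, Bool.false_eq_true, if_false]
    by_cases h10 : ds.length = 10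
    · simp [h10, pvCheck10, pvStOf, PySem.List.len]
    · by_cases h12 : ds.length = 12
      · simp [h12, pvCheck12, pvStOf, PySem.List.len]
      · have h10' : ¬((ds.length : Int) = 10) := by exact_mod_cast h10
        have h12' : ¬((ds.length : Int) = 12) := by exact_mod_cast h12
        simp [h10', h12', h10, h12, pvStOf, PySem.List.len]
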